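-- pv_equiv track=rewrite | github.com/ePaint/poker_image_analyzer | hand_history/__init__.py | calculate_seat_mapping
-- ===== SOURCE A (Python) =====
-- POSITION_ORDER_6PLAYER = ("bottom", "bottom_left", "top_left", "top", "top_right", "bottom_right")
--
-- POSITION_ORDER_5PLAYER = ("bottom", "left", "top_left", "top_right", "right")
--
-- DEFAULT_SEAT_MAPPINGS: dict[str, dict[str, int]] = {
--     "6_player": {
--         "bottom": 1,
--         "bottom_left": 2,
--         "top_left": 3,
--         "top": 4,
--         "top_right": 5,
--         "bottom_right": 6,
--     },
--     "5_player": {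
--         "bottom": 1,
--         "left": 2,
--         "top_left": 3,
--         "top_right": 4,
--         "right": 5,
--     },
-- }
--
-- _TABLE_TYPE_ALIASES = {
--     "ggpoker": "6_player",
--     "natural8": "5_player",
-- }
--
-- def _normalize_table_type(table_type: str) -> str:
--     """Normalize legacy table type names to new format."""
--     return _TABLE_TYPE_ALIASES.get(table_type, table_type)
--
-- def calculate_seat_mapping(
--     screenshot_button_position: str,
--     hand_button_seat: int,
--     table_type: str = "6_player",
-- ) -> dict[str, int]:
--     """Calculate position-to-seat mapping based on button positions.
--
--     Uses the dealer button as an anchor to align screenshot positions with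
--     hand history seat numbers. The button position in the screenshot tells us
--     which screen position corresponds to the button seat in the hand history.
--
--     Args:
--         screenshot_button_position: Position name where D button was detected (e.g., "top_left")
--         hand_button_seat: Seat number that has the button in hand history (1-6)
--         table_type: "6_player" or "5_player"
--
--     Returns:
--         Dict mapping position name to seat number
--     """
--     normalized_type = _normalize_table_type(table_type)
--     position_order = POSITION_ORDER_5PLAYER if normalized_type == "5_player" else POSITION_ORDER_6PLAYER
--     num_seats = len(position_order)
--
--     if screenshot_button_position not in position_order:
--         return DEFAULT_SEAT_MAPPINGS.get(normalized_type, DEFAULT_SEAT_MAPPINGS["6_player"]).copy()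
--
--     button_position_idx = position_order.index(screenshot_button_position)
--
--     mapping: dict[str, int] = {}
--     for i, position in enumerate(position_order):
--         offset = i - button_position_idx
--         seat = ((hand_button_seat - 1 + offset) % num_seats) + 1
--         mapping[position] = seat
--
--     return mapping
-- ===== SOURCE B (Python) =====
-- POSITION_ORDER_6PLAYER = ("bottom", "bottom_left", "top_left", "top", "top_right", "bottom_right")
--
-- POSITION_ORDER_5PLAYER = ("bottom", "left", "top_left", "top_right", "right")
--
-- DEFAULT_SEAT_MAPPINGS = {
--     "6_player": {
--         "bottom": 1,
--         "bottom_left": 2,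
--         "top_left": 3,
--         "top": 4,
--         "top_right": 5,
--         "bottom_right": 6,
--     },
--     "5_player": {
--         "bottom": 1,
--         "left": 2,
--         "top_left": 3,
--         "top_right": 4,
--         "right": 5,
--     },
-- }
--
-- _TABLE_TYPE_ALIASES = {
--     "ggpoker": "6_player",
--     "natural8": "5_player",
-- }
--
--
-- def calculate_seat_mapping(screenshot_button_position, hand_button_seat, table_type="6_player"):
--     """Rotation-based re-implementation: build the consecutive seat sequence
--     starting at the button seat, rotate it under the button's screen index,
--     and zip it with the position names -- no per-element offset arithmetic."""
--     normalized_type = _TABLE_TYPE_ALIASES.get(table_type, table_type)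
--     position_order = POSITION_ORDER_5PLAYER if normalized_type == "5_player" else POSITION_ORDER_6PLAYER
--     num_seats = len(position_order)
--
--     if screenshot_button_position not in position_order:
--         return DEFAULT_SEAT_MAPPINGS.get(normalized_type, DEFAULT_SEAT_MAPPINGS["6_player"]).copy()
--
--     button_idx = position_order.index(screenshot_button_position)
--
--     # seats 1..n rotated so the button's seat comes first
--     start = (hand_button_seat - 1) % num_seats
--     seats = list(range(1, num_seats + 1))
--     seq = seats[start:] + seats[:start]
--     # rotate right by the button's screen index so seq lines up with position_order
--     assigned = seq[num_seats - button_idx:] + seq[:num_seats - button_idx]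
--     return dict(zip(position_order, assigned))
-- ===== Notes on version B (the rewrite author's own statement) =====
-- stated objective: alternative
-- what changed: Instead of computing a signed offset against the button's index for every position and doing modular arithmetic per element, B builds the consecutive seat sequence starting at the button seat once (one mod), rotates it with two list slices to line up with the position order, and zips it with the position names.
import Mathlib
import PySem

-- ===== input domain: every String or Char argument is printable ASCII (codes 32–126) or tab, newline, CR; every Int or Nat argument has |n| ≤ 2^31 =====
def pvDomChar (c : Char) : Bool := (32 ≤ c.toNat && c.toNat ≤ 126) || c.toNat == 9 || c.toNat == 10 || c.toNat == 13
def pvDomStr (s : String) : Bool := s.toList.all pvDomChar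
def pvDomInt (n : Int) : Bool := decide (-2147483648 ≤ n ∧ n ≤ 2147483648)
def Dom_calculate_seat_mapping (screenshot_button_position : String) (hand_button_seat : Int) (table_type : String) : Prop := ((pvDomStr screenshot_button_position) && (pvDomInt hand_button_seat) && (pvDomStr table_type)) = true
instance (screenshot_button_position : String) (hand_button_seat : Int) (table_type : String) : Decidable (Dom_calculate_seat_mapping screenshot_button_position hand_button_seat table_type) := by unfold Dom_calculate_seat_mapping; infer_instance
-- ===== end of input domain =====

-- B replaces A's per-element offset arithmetic by building the consecutive seat sequence once and
-- rotating it with list slices (objective: alternative decomposition, same cost).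
-- Module constants shared by both ports (they are module-level constants in the Python too).
def POSITION_ORDER_6PLAYER : List String :=
  ["bottom", "bottom_left", "top_left", "top", "top_right", "bottom_right"]

def POSITION_ORDER_5PLAYER : List String :=
  ["bottom", "left", "top_left", "top_right", "right"]

def DEFAULT_SEAT_MAPPINGS : PySem.Dict String (PySem.Dict String Int) :=
  PySem.Dict.mk
    [ ("6_player", PySem.Dict.mk
        [("bottom", 1), ("bottom_left", 2), ("top_left", 3), ("top", 4), ("top_right", 5), ("bottom_right", 6)]),
      ("5_player", PySem.Dict.mk
        [("bottom", 1), ("left", 2), ("top_left", 3), ("top_right", 4), ("right", 5)]) ]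

def TABLE_TYPE_ALIASES : PySem.Dict String String :=
  PySem.Dict.mk [("ggpoker", "6_player"), ("natural8", "5_player")]

def normalize_table_type (table_type : String) : String :=
  PySem.Dict.getD TABLE_TYPE_ALIASES table_type table_type

-- ===== PORT A =====
-- Literal port of A.  'DEFAULT_SEAT_MAPPINGS["6_player"]' never raises (the key is present),
-- so its port is the getD with an unreachable [] default.  In the loop branch the position is a
-- member of position_order, so 'index?' is some and '.getD 0' is exact.
def calculate_seat_mapping (screenshot_button_position : String) (hand_button_seat : Int) (table_type : String) : List (String × Int) :=
  let normalized_type := normalize_table_type table_type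
  let position_order := if normalized_type = "5_player" then POSITION_ORDER_5PLAYER else POSITION_ORDER_6PLAYER
  let num_seats : Int := (position_order.length : Int)
  if screenshot_button_position ∈ position_order then
    let button_position_idx : Int :=
      (((PySem.List.index? position_order screenshot_button_position).getD 0 : Nat) : Int)
    ((PySem.List.enumerate position_order 0).foldl
      (fun (mapping : PySem.Dict String Int) (p : Int × String) =>
        let offset := p.1 - button_position_idx
        let seat := PySem.Int.mod (hand_button_seat - 1 + offset) num_seats + 1
        mapping.insert p.2 seat)
      PySem.Dict.empty).items
  else
    (PySem.Dict.getD DEFAULT_SEAT_MAPPINGS normalized_type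
      (PySem.Dict.getD DEFAULT_SEAT_MAPPINGS "6_player" (PySem.Dict.mk []))).items

-- ===== PORT B =====
-- Literal port of Source B: consecutive seat numbers from the button seat, rotated by slices, zipped.
def calculate_seat_mapping_alt (screenshot_button_position : String) (hand_button_seat : Int) (table_type : String) : List (String × Int) :=
  let normalized_type := normalize_table_type table_type
  let position_order := if normalized_type = "5_player" then POSITION_ORDER_5PLAYER else POSITION_ORDER_6PLAYER
  let num_seats : Int := (position_order.length : Int)
  if screenshot_button_position ∈ position_order then
    let button_idx : Int :=
      (((PySem.List.index? position_order screenshot_button_position).getD 0 : Nat) : Int)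
    let start := PySem.Int.mod (hand_button_seat - 1) num_seats
    let seats := PySem.List.pyRange 1 (num_seats + 1) 1
    let seq := PySem.List.slice seats (some start) none ++ PySem.List.slice seats none (some start)
    let assigned := PySem.List.slice seq (some (num_seats - button_idx)) none ++
                    PySem.List.slice seq none (some (num_seats - button_idx))
    (PySem.Dict.ofList (position_order.zip assigned)).items
  else
    (PySem.Dict.getD DEFAULT_SEAT_MAPPINGS normalized_type
      (PySem.Dict.getD DEFAULT_SEAT_MAPPINGS "6_player" (PySem.Dict.mk []))).items

-- ===== PRECONDITION & SPEC =====
def Spec_calculate_seat_mapping (screenshot_button_position : String) (hand_button_seat : Int) (table_type : String) (out : List (String × Int)) : Prop := out = calculate_seat_mapping_alt screenshot_button_position hand_button_seat table_type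
instance (screenshot_button_position : String) (hand_button_seat : Int) (table_type : String) (out : List (String × Int)) : Decidable (Spec_calculate_seat_mapping screenshot_button_position hand_button_seat table_type out) := by unfold Spec_calculate_seat_mapping; infer_instance

-- ===== CLAIM (what is proved, stated in full; the proofs are below) =====
def Claim_equal_calculate_seat_mapping : Prop := ∀ (screenshot_button_position : String) (hand_button_seat : Int) (table_type : String), Dom_calculate_seat_mapping screenshot_button_position hand_button_seat table_type → Spec_calculate_seat_mapping screenshot_button_position hand_button_seat table_type (calculate_seat_mapping screenshot_button_position hand_button_seat table_type)

-- ===== LEMMAS AND PROOFS =====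

-- ===== VERDICT (by name: the statement is the Claim_ definition above) =====
set_option maxHeartbeats 2000000 in
theorem calculate_seat_mapping_spec : Claim_equal_calculate_seat_mapping := by
  intro p h t _
  unfold Spec_calculate_seat_mapping calculate_seat_mapping calculate_seat_mapping_alt
  rcases eq_or_ne (normalize_table_type t) "5_player" with h5 | h5
  · simp only [if_pos h5, POSITION_ORDER_5PLAYER]
    by_cases hm : p ∈ ["bottom", "left", "top_left", "top_right", "right"]
    · simp only [if_pos hm]
      fin_cases hm <;>
        · simp [PySem.List.index?_eq_idxOf?, PySem.List.enumerate, PySem.Dict.insert,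
            PySem.Dict.empty, PySem.Dict.ofList, PySem.Dict.items, PySem.Dict.contains,
            PySem.List.pyRange, PySem.Int.mod_eq_emod_of_pos]
          set r := (h - 1) % 5 with hr
          have h0 : 0 ≤ r := Int.emod_nonneg _ (by norm_num)
          have h5' : r < 5 := Int.emod_lt_of_pos _ (by norm_num)
          interval_cases r <;>
            simp [PySem.List.slice, PySem.List.clampIdx, List.idxOf?, List.findIdx?,
              List.findIdx?.go, PySem.Dict.update, PySem.Dict.insert, PySem.Dict.contains,
              PySem.Dict.items, List.range_succ, List.cons.injEq, Prod.mk.injEq] <;>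
            omega
    · simp only [if_neg hm]
  · simp only [if_neg h5, POSITION_ORDER_6PLAYER]
    by_cases hm : p ∈ ["bottom", "bottom_left", "top_left", "top", "top_right", "bottom_right"]
    · simp only [if_pos hm]
      fin_cases hm <;>
        · simp [PySem.List.index?_eq_idxOf?, PySem.List.enumerate, PySem.Dict.insert,
            PySem.Dict.empty, PySem.Dict.ofList, PySem.Dict.items, PySem.Dict.contains,
            PySem.List.pyRange, PySem.Int.mod_eq_emod_of_pos]
          set r := (h - 1) % 6 with hr
          have h0 : 0 ≤ r := Int.emod_nonneg _ (by norm_num)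
          have h6 : r < 6 := Int.emod_lt_of_pos _ (by norm_num)
          interval_cases r <;>
            simp [PySem.List.slice, PySem.List.clampIdx, List.idxOf?, List.findIdx?,
              List.findIdx?.go, PySem.Dict.update, PySem.Dict.insert, PySem.Dict.contains,
              PySem.Dict.items, List.range_succ, List.cons.injEq, Prod.mk.injEq] <;>
            omega
    · simp only [if_neg hm]
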